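-- pv_equiv track=rewrite | github.com/LTCZZZZZ/DeepLearningPython3 | DynamicProgramming/leetcode_72_transition.py | assist2
-- ===== SOURCE A (Python) =====
-- def contains(w1, w2):
--     """
--     w1是否按序包含w2，如abcde包含ace
--     """
--
--     # w2放在前面，可兼容w1和w2同时耗尽的情况
--     if w2 == '':
--         return True
--     if w1 == '':
--         return False
--
--     if w1[0] == w2[0]:
--         return contains(w1[1:], w2[1:])
--     else:
--         return contains(w1[1:], w2)
--
-- def assist2(common, word1):
--     """
--     从word1中找出最紧凑的common
--     """
--     index_list = []
--     for i, c in enumerate(word1):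
--         if common[0] == c:
--             index_list.append(i)
--
--     res = []
--     for ix in index_list:
--         if contains(word1[ix:], common):
--             res.append(ix)
--     return max(res)
-- ===== SOURCE B (Python) =====
-- def assist2(common, word1):
--     # Single right-to-left greedy scan: match common backwards; the index where
--     # common[0] is finally matched is the maximal feasible start index.
--     j = len(common) - 1
--     for i in range(len(word1) - 1, -1, -1):
--         if word1[i] == common[j]:
--             if j == 0:
--                 return i
--             j -= 1
--     raise ValueError("word1 does not contain common")
-- ===== Notes on version B (the rewrite author's own statement) =====
-- stated objective: faster
-- what changed: Replaces A's collect-all-candidate-indices plus per-candidate recursive subsequence check on slices with one right-to-left greedy scan that matches common backwards and returns at the index where common[0] is matched.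
import Mathlib
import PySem

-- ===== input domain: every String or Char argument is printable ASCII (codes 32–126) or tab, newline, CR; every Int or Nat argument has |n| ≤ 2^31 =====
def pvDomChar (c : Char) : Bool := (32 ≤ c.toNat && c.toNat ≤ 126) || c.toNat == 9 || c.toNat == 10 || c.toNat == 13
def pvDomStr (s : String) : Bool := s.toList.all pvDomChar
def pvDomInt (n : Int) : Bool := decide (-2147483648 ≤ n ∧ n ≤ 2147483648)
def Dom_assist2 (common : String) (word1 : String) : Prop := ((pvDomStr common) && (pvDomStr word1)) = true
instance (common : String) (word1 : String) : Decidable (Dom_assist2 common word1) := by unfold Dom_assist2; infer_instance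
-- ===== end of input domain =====

-- ===== PORT A =====
-- B replaces A's collect-all-candidates + per-candidate recursive subsequence check (on slices)
-- with a single right-to-left greedy backwards match; return value only (neither mutates).

-- ===== PORT A =====
-- contains(w1, w2): does w1 contain w2 as a subsequence (recursion on w1, branches in Python's order)
def containsA : List Char → List Char → Bool
  | _, [] => true                       -- if w2 == '': return True
  | [], _ :: _ => false                 -- if w1 == '': return False
  | c1 :: t1, c2 :: t2 =>
      if c1 = c2 then containsA t1 t2 else containsA t1 (c2 :: t2)

def assist2 (common : String) (word1 : String) : Int :=
  let cs := common.toList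
  let ws := word1.toList
  match cs with
  | [] => 0      -- Python raises here (IndexError on common[0], or ValueError on max([]) if word1 == ''); outside Pre_
  | c0 :: _ =>
    -- index_list = [i for i, c in enumerate(word1) if common[0] == c]  (built by append, as in A)
    let index_list : List Int :=
      (PySem.List.enumerate ws 0).foldl (fun acc p => if c0 == p.2 then acc ++ [p.1] else acc) []
    -- res = [ix for ix in index_list if contains(word1[ix:], common)]
    let res : List Int :=
      index_list.foldl
        (fun acc ix => if containsA (PySem.List.slice ws (some ix) none) cs then acc ++ [ix] else acc) []
    match PySem.List.max? res (fun x => x) with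
    | some m => m
    | none => 0  -- Python: max([]) raises ValueError; outside Pre_

-- ===== PORT B =====
-- Source B's countdown loop 'for i in range(len(word1)-1, -1, -1)' with pointer j into common,
-- transcribed as structural recursion over the reversed word with the reversed common as the
-- remaining-pattern state (j = number of remaining pattern chars - 1); the index i is carried along.
def bgoB : List Char → List Char → Int → Int
  | [], _, _ => -1                 -- loop exhausted: Python raises ValueError; outside Pre_
  | _ :: _, [], _ => -1            -- common == '': Python raises IndexError on common[j]; outside Pre_
  | x :: r', y :: q', i =>
      if x = y then
        (if q' = [] then i         -- j == 0: return i
         else bgoB r' q' (i - 1))  -- j -= 1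
      else bgoB r' (y :: q') (i - 1)

def assist2_alt (common : String) (word1 : String) : Int :=
  bgoB word1.toList.reverse common.toList.reverse ((word1.toList.length : Int) - 1)

-- ===== PRECONDITION & SPEC =====
-- Pre_ excludes exactly the inputs on which Python A raises: common == '' (IndexError on common[0],
-- or ValueError if word1 is also '') and common not a subsequence of word1 (max([]) raises ValueError).
def Pre_assist2 (common : String) (word1 : String) : Prop :=
  common.toList ≠ [] ∧ common.toList.Sublist word1.toList
instance (common : String) (word1 : String) : Decidable (Pre_assist2 common word1) := by
  unfold Pre_assist2; infer_instance

def pvWitness_assist2 : String × String := ("ace", "abcade")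

def Spec_assist2 (common : String) (word1 : String) (out : Int) : Prop := out = assist2_alt common word1
instance (common : String) (word1 : String) (out : Int) : Decidable (Spec_assist2 common word1 out) := by
  unfold Spec_assist2; infer_instance

-- ===== CLAIM (what is proved, stated in full; the proofs are below) =====
def Claim_equal_assist2 : Prop := ∀ (common : String) (word1 : String), Dom_assist2 common word1 → Pre_assist2 common word1 → Spec_assist2 common word1 (assist2 common word1)

-- ===== LEMMAS AND PROOFS =====

-- head-mismatch cancellation for sublists, used on both sides
theorem sublist_tail_of_ne {y x : Char} {c t : List Char}
    (hne : x ≠ y) (h : List.Sublist (y :: c) (x :: t)) : List.Sublist (y :: c) t := by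
  rcases List.sublist_cons_iff.1 h with h' | ⟨r, hr, _⟩
  · exact h'
  · cases hr; exact absurd rfl hne

-- A's contains decides the subsequence relation
theorem containsA_iff (w c : List Char) : containsA w c = true ↔ List.Sublist c w := by
  induction w generalizing c with
  | nil => cases c <;> simp [containsA]
  | cons x w' ih =>
    cases c with
    | nil => simp [containsA]
    | cons y c' =>
      by_cases hxy : x = y
      · subst hxy
        simp [containsA, ih]
      · simp only [containsA, if_neg hxy, ih]
        exact ⟨fun h => h.cons x, fun h => sublist_tail_of_ne hxy h⟩

-- proof-side helper: length of the shortest prefix of r containing q as a subsequence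
-- (none if there is none); this is the quantity B's greedy scan tracks
def gk : List Char → List Char → Option Nat
  | _, [] => some 0
  | [], _ :: _ => none
  | x :: r', y :: q' =>
      if x = y then (gk r' q').map (· + 1) else (gk r' (y :: q')).map (· + 1)

theorem gk_le {r q : List Char} {k : Nat} (h : gk r q = some k) : k ≤ r.length := by
  induction r generalizing q k with
  | nil => cases q <;> simp_all [gk]
  | cons x r' ih =>
    cases q with
    | nil => simp [gk] at h; omega
    | cons y q' =>
      simp only [gk] at h
      split at h <;>
      · rcases Option.map_eq_some_iff.1 h with ⟨k', hk', rfl⟩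
        have := ih hk'; simp; omega

theorem gk_pos {r q : List Char} {k : Nat} (hq : q ≠ []) (h : gk r q = some k) : 1 ≤ k := by
  cases r with
  | nil => cases q <;> simp_all [gk]
  | cons x r' =>
    cases q with
    | nil => exact absurd rfl hq
    | cons y q' =>
      simp only [gk] at h
      split at h <;>
      · rcases Option.map_eq_some_iff.1 h with ⟨k', _, rfl⟩; omega

theorem gk_sound {r q : List Char} {k : Nat} (h : gk r q = some k) :
    List.Sublist q (r.take k) := by
  induction r generalizing q k with
  | nil => cases q <;> simp_all [gk]
  | cons x r' ih =>
    cases q with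
    | nil => simp
    | cons y q' =>
      simp only [gk] at h
      split at h
      · next hxy =>
        subst hxy
        rcases Option.map_eq_some_iff.1 h with ⟨k', hk', rfl⟩
        rw [List.take_succ_cons]
        exact List.cons_sublist_cons.2 (ih hk')
      · next hxy =>
        rcases Option.map_eq_some_iff.1 h with ⟨k', hk', rfl⟩
        rw [List.take_succ_cons]
        exact (ih hk').cons x

theorem gk_min {r q : List Char} {m : Nat} (h : List.Sublist q (r.take m)) :
    ∃ k, gk r q = some k ∧ k ≤ m := by
  induction r generalizing q m with
  | nil =>
    cases q with
    | nil => exact ⟨0, rfl, Nat.zero_le _⟩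
    | cons y q' => simp at h
  | cons x r' ih =>
    cases q with
    | nil => exact ⟨0, rfl, Nat.zero_le _⟩
    | cons y q' =>
      cases m with
      | zero => simp at h
      | succ m' =>
        rw [List.take_succ_cons] at h
        by_cases hxy : x = y
        · subst hxy
          rcases ih (List.cons_sublist_cons.1 h) with ⟨k', hk', hle⟩
          exact ⟨k' + 1, by simp [gk, hk'], by omega⟩
        · rcases ih (sublist_tail_of_ne hxy h) with ⟨k', hk', hle⟩
          exact ⟨k' + 1, by simp [gk, if_neg hxy, hk'], by omega⟩

-- B's loop, characterised by gk
theorem bgoB_eq_gk (r : List Char) : ∀ (q : List Char) (i : Int), q ≠ [] →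
    bgoB r q i = (match gk r q with | none => -1 | some k => i - k + 1) := by
  induction r with
  | nil =>
    intro q i hq
    cases q with
    | nil => exact absurd rfl hq
    | cons y q' => simp [bgoB, gk]
  | cons x r' ih =>
    intro q i hq
    cases q with
    | nil => exact absurd rfl hq
    | cons y q' =>
      by_cases hxy : x = y
      · subst hxy
        cases q' with
        | nil => simp [bgoB, gk]
        | cons z q'' =>
          have h := ih (z :: q'') (i - 1) (by simp)
          simp only [bgoB, gk, reduceCtorEq, h]
          cases hg : gk r' (z :: q'') with
          | none => simp
          | some k' => simp; omega
      · have h := ih (y :: q') (i - 1) (by simp)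
        simp only [bgoB, if_neg hxy, gk, h]
        cases hg : gk r' (y :: q') with
        | none => simp
        | some k' => simp; omega

-- ===== VERDICT (by name: the statement is the Claim_ definition above) =====
theorem assist2_spec : Claim_equal_assist2 := by
  intro common word1 _ hpre
  obtain ⟨hne, hsub⟩ := hpre
  cases hcs : common.toList with
  | nil => exact absurd hcs hne
  | cons c0 ct =>
    rw [hcs] at hsub
    unfold Spec_assist2
    simp only [assist2, assist2_alt, hcs]
    set ws := word1.toList with hws
    set n := ws.length with hn
    set rw_ := ws.reverse with hrw
    set q := (c0 :: ct).reverse with hqdef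
    have hqne : q ≠ [] := by simp [hqdef]
    -- the greedy quantity exists
    have hq_sub : List.Sublist q (rw_.take rw_.length) := by
      rw [List.take_length]
      exact (List.reverse_sublist (l₂ := ws)).2 hsub
    obtain ⟨k, hgk, -⟩ := gk_min hq_sub
    have hk1 : 1 ≤ k := gk_pos hqne hgk
    have hkn : k ≤ n := by have := gk_le hgk; simpa [hrw] using this
    -- F2: any feasible start index j is ≤ n - k
    have F2 : ∀ j : Nat, j ≤ n → List.Sublist (c0 :: ct) (ws.drop j) → j ≤ n - k := by
      intro j hj hsubj
      have : List.Sublist q ((ws.drop j).reverse) := List.reverse_sublist.2 hsubj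
      rw [List.reverse_drop, ← hrw] at this
      obtain ⟨k', hk', hk'le⟩ := gk_min this
      rw [hgk] at hk'; injection hk' with hk'; subst hk'
      omega
    -- F1: n - k is feasible
    have F1 : List.Sublist (c0 :: ct) (ws.drop (n - k)) := by
      have h1 := gk_sound hgk
      have h2 : rw_.take k = (ws.drop (n - k)).reverse := by
        rw [List.reverse_drop]
        congr 1
        omega
      rw [h2] at h1
      exact List.reverse_sublist.1 (by simpa [hqdef] using h1)
    have hnk_lt : n - k < n := by omega
    -- F3: the character at the maximal feasible index is c0
    have hdropc : ws.drop (n - k) = ws[n - k] :: ws.drop (n - k + 1) :=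
      List.drop_eq_getElem_cons hnk_lt
    have F3 : ws[n - k] = c0 := by
      by_contra hne3
      rw [hdropc] at F1
      have := F2 (n - k + 1) (by omega) (sublist_tail_of_ne hne3 F1)
      omega
    -- rewrite A's two loops as filter/map
    rw [PySem.List.foldl_append_if (fun p : Int × Char => c0 == p.2) (fun p : Int × Char => p.1)]
    rw [PySem.List.foldl_append_if
      (fun ix => containsA (PySem.List.slice ws (some ix) none) (c0 :: ct)) (fun ix => ix)]
    simp only [List.nil_append, List.map_id']
    set res := (((PySem.List.enumerate ws 0).filter (fun p => c0 == p.2)).map (fun p => p.1)).filter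
      (fun ix => containsA (PySem.List.slice ws (some ix) none) (c0 :: ct)) with hres
    -- membership characterisation of res
    have hmem : ∀ x : Int, x ∈ res ↔
        ∃ (j : Nat) (h : j < n), x = (j : Int) ∧ c0 = ws[j] ∧
          List.Sublist (c0 :: ct) (ws.drop j) := by
      intro x
      rw [hres]
      simp only [List.mem_filter, List.mem_map, PySem.List.mem_enumerate_iff]
      constructor
      · rintro ⟨⟨p, ⟨⟨j, hj, rfl⟩, hc⟩, rfl⟩, hcont⟩
        refine ⟨j, hj, by simp, by simpa using hc, ?_⟩
        have := hcont
        rw [show ((0 : Int) + (j : Int)) = ((j : Int)) by omega,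
          PySem.List.slice_from_natCast] at this
        exact (containsA_iff _ _).1 this
      · rintro ⟨j, hj, rfl, hc, hsubj⟩
        refine ⟨⟨(0 + (j : Int), ws[j]), ⟨⟨j, hj, rfl⟩, by simpa using hc⟩, by simp⟩, ?_⟩
        rw [PySem.List.slice_from_natCast]
        exact (containsA_iff _ _).2 hsubj
    -- the maximal element
    have hmstar : ((n - k : Nat) : Int) ∈ res :=
      (hmem _).2 ⟨n - k, hnk_lt, rfl, F3.symm, F1⟩
    have hub : ∀ x ∈ res, x ≤ ((n - k : Nat) : Int) := by
      intro x hx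
      obtain ⟨j, hj, rfl, -, hsubj⟩ := (hmem x).1 hx
      exact_mod_cast F2 j (by omega) hsubj
    cases hmax : PySem.List.max? res (fun x => x) with
    | none =>
      rw [PySem.List.max?_eq_none_iff] at hmax
      rw [hmax] at hmstar
      simp at hmstar
    | some m =>
      have hm_mem := PySem.List.max?_mem hmax
      have hm_max := PySem.List.max?_isMax hmax
      have h1 : m ≤ ((n - k : Nat) : Int) := hub m hm_mem
      have h2 : ((n - k : Nat) : Int) ≤ m := hm_max _ hmstar
      have hm : m = ((n - k : Nat) : Int) := le_antisymm h1 h2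
      -- B's value
      rw [bgoB_eq_gk rw_ q ((n : Int) - 1) hqne, hgk]
      show m = (n : Int) - 1 - (k : Int) + 1
      rw [hm]
      omega
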